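-- pv_equiv track=rewrite | github.com/Kamva-Academy/Kamva-Backend | apps/scoring/views/apply_scores_on_user.py | does_contain
-- ===== SOURCE A (Python) =====
-- def does_contain(scores1, scores2):
--     scores = {}
--     for score_type_name in scores1:
--         scores[score_type_name] = scores1[score_type_name]
--     for score_type_name in scores2:
--         if score_type_name in scores1:
--             scores[score_type_name] -= scores2[score_type_name]
--         elif scores2[score_type_name] > 0:
--             return False
--     for score_type_name in scores:
--         if scores[score_type_name] < 0:
--             return False
--     return True
-- ===== SOURCE B (Python) =====
-- def does_contain(scores1, scores2):
--     items1 = sorted(scores1.items(), key=lambda kv: kv[0])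
--     items2 = sorted(scores2.items(), key=lambda kv: kv[0])
--     i, j = 0, 0
--     n1, n2 = len(items1), len(items2)
--     while i < n1 and j < n2:
--         k1, v1 = items1[i]
--         k2, v2 = items2[j]
--         if k1 == k2:
--             if v1 < v2:
--                 return False
--             i += 1
--             j += 1
--         elif k1 < k2:
--             if v1 < 0:
--                 return False
--             i += 1
--         else:
--             if v2 > 0:
--                 return False
--             j += 1
--     while i < n1:
--         if items1[i][1] < 0:
--             return False
--         i += 1
--     while j < n2:
--         if items2[j][1] > 0:
--             return False
--         j += 1
--     return True
-- ===== Notes on version B (the rewrite author's own statement) =====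
-- stated objective: alternative
-- what changed: Replaces A's copy-dict with three hash-based passes (copy scores1, subtract/early-exit over scores2, final deficit scan) by sorting both item lists by key and running a single two-pointer merge that checks shared keys (v1>=v2), scores1-only keys (v1>=0) and scores2-only keys (v2<=0) in one ordered sweep.
import Mathlib
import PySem

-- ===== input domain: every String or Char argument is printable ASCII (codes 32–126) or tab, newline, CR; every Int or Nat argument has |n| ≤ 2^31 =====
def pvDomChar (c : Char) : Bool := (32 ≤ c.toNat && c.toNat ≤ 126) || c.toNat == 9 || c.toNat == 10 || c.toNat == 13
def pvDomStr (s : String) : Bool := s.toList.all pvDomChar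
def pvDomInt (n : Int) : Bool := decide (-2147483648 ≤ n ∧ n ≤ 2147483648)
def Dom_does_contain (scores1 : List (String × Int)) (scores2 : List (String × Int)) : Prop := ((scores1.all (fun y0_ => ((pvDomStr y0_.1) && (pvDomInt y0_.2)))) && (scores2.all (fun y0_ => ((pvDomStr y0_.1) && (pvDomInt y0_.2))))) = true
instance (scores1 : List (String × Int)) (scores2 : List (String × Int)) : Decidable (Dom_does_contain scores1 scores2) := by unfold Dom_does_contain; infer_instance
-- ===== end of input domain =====

-- B replaces A's copy-dict and three hash-based passes by sorting both item lists by key and one two-pointer merge sweep — objective: alternative.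


-- ===== PORT A =====
-- A's second loop: 'for k in scores2: if k in scores1: scores[k] -= scores2[k] elif scores2[k] > 0: return False'
def doesContainLoop2 (d1 : PySem.Dict String Int) (l : List (String × Int))
    (scores : PySem.Dict String Int) : Option (PySem.Dict String Int) :=
  match l with
  | [] => some scores
  | (k, v) :: rest =>
    if d1.contains k then doesContainLoop2 d1 rest (scores.modify k 0 (· - v))
    else if v > 0 then none
    else doesContainLoop2 d1 rest scores

-- first loop: scores = {}; for k in scores1: scores[k] = scores1[k]; then loop 2; then
-- third loop: for k in scores: if scores[k] < 0: return False; return True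
def does_contain (scores1 : List (String × Int)) (scores2 : List (String × Int)) : Bool :=
  let d1 := PySem.Dict.ofList scores1
  let d2 := PySem.Dict.ofList scores2
  let scores := d1.items.foldl (fun d p => d.insert p.1 p.2) PySem.Dict.empty
  match doesContainLoop2 d1 d2.items scores with
  | none => false
  | some d => d.items.all (fun p => !(p.2 < 0))

-- ===== PORT B =====
-- B's trailing loop 'while i < n1: if items1[i][1] < 0: return False; i += 1'
def dcTail1 : List (String × Int) → Bool
  | [] => true
  | (_, v) :: r => if v < 0 then false else dcTail1 r

-- B's trailing loop 'while j < n2: if items2[j][1] > 0: return False; j += 1'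
def dcTail2 : List (String × Int) → Bool
  | [] => true
  | (_, v) :: r => if v > 0 then false else dcTail2 r

-- B's main loop 'while i < n1 and j < n2: …' (the indices become the list suffixes)
def dcMerge : List (String × Int) → List (String × Int) → Bool
  | [], l2 => dcTail2 l2
  | l1, [] => dcTail1 l1
  | (k1, v1) :: r1, (k2, v2) :: r2 =>
    if k1 == k2 then
      if v1 < v2 then false else dcMerge r1 r2
    else if k1 < k2 then
      if v1 < 0 then false else dcMerge r1 ((k2, v2) :: r2)
    else
      if v2 > 0 then false else dcMerge ((k1, v1) :: r1) r2

-- B: sort both item lists by key, then one two-pointer merge sweep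
def does_contain_alt (scores1 : List (String × Int)) (scores2 : List (String × Int)) : Bool :=
  let items1 := PySem.List.sorted (PySem.Dict.ofList scores1).items (fun kv => kv.1)
  let items2 := PySem.List.sorted (PySem.Dict.ofList scores2).items (fun kv => kv.1)
  dcMerge items1 items2

-- ===== PRECONDITION & SPEC =====
def Spec_does_contain (scores1 : List (String × Int)) (scores2 : List (String × Int)) (out : Bool) : Prop := out = does_contain_alt scores1 scores2
instance (scores1 : List (String × Int)) (scores2 : List (String × Int)) (out : Bool) : Decidable (Spec_does_contain scores1 scores2 out) := by unfold Spec_does_contain; infer_instance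

-- ===== CLAIM (what is proved, stated in full; the proofs are below) =====
def Claim_equal_does_contain : Prop := ∀ (scores1 : List (String × Int)) (scores2 : List (String × Int)), Dom_does_contain scores1 scores2 → Spec_does_contain scores1 scores2 (does_contain scores1 scores2)

-- ===== LEMMAS AND PROOFS =====

-- first lookup value for key k (0 when absent): what both sides' per-key comparison is about
def lkD (l : List (String × Int)) (k : String) : Int :=
  ((l.find? (fun p => p.1 == k)).map Prod.snd).getD 0

theorem lkD_nil (k : String) : lkD [] k = 0 := rfl

theorem lkD_cons_eq (k' k : String) (v : Int) (r : List (String × Int)) :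
    lkD ((k, v) :: r) k' = if k' = k then v else lkD r k' := by
  by_cases h : k' = k
  · subst h; simp [lkD]
  · simp [lkD, Ne.symm h, h]

theorem lkD_of_not_mem (l : List (String × Int)) (k : String)
    (h : k ∉ l.map Prod.fst) : lkD l k = 0 := by
  induction l with
  | nil => rfl
  | cons p r ih =>
    simp only [List.map_cons, List.mem_cons, not_or] at h
    rw [show p = (p.1, p.2) from rfl, lkD_cons_eq, if_neg h.1]
    exact ih h.2

theorem lkD_of_mem (l : List (String × Int)) (k : String) (v : Int)
    (hnd : (l.map Prod.fst).Nodup) (hm : (k, v) ∈ l) : lkD l k = v := by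
  induction l with
  | nil => simp at hm
  | cons p r ih =>
    simp only [List.map_cons, List.nodup_cons] at hnd
    rcases List.mem_cons.mp hm with he | hr
    · rw [← he, lkD_cons_eq, if_pos rfl]
    · rw [show p = (p.1, p.2) from rfl, lkD_cons_eq]
      have hk : k ≠ p.1 := fun he => hnd.1 (he ▸ List.mem_map.mpr ⟨(k, v), hr, rfl⟩)
      rw [if_neg hk]
      exact ih hnd.2 hr

theorem dcTail1_iff (l : List (String × Int)) : dcTail1 l = true ↔ ∀ p ∈ l, 0 ≤ p.2 := by
  induction l with
  | nil => simp [dcTail1]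
  | cons p r ih =>
    obtain ⟨k, v⟩ := p
    by_cases h : v < 0 <;> simp [dcTail1, h, ih] <;> omega

theorem dcTail2_iff (l : List (String × Int)) : dcTail2 l = true ↔ ∀ p ∈ l, p.2 ≤ 0 := by
  induction l with
  | nil => simp [dcTail2]
  | cons p r ih =>
    obtain ⟨k, v⟩ := p
    by_cases h : v > 0 <;> simp [dcTail2, h, ih] <;> omega

-- characterisation of the merge sweep on key-strictly-increasing lists
theorem dcMerge_iff (l1 l2 : List (String × Int))
    (h1 : l1.Pairwise (fun a b => a.1 < b.1)) (h2 : l2.Pairwise (fun a b => a.1 < b.1)) :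
    dcMerge l1 l2 = true ↔
      (∀ p ∈ l1, lkD l2 p.1 ≤ p.2) ∧ (∀ p ∈ l2, p.2 ≤ lkD l1 p.1) := by
  induction l1 generalizing l2 with
  | nil =>
    simp only [dcMerge, dcTail2_iff, lkD_nil]
    constructor
    · exact fun h => ⟨by simp, h⟩
    · exact fun h => h.2
  | cons p1 r1 ih1 =>
    obtain ⟨k1, v1⟩ := p1
    rw [List.pairwise_cons] at h1
    induction l2 with
    | nil =>
      simp only [dcMerge, dcTail1_iff, lkD_nil]
      constructor
      · exact fun h => ⟨h, by simp⟩
      · exact fun h => h.1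
    | cons p2 r2 ih2 =>
      obtain ⟨k2, v2⟩ := p2
      rw [List.pairwise_cons] at h2
      by_cases heq : k1 = k2
      · subst heq
        simp only [dcMerge, beq_self_eq_true, if_true]
        rw [show (if v1 < v2 then false else dcMerge r1 r2) = true ↔
              (v2 ≤ v1 ∧ dcMerge r1 r2 = true) by split_ifs with h <;> simp <;> omega,
          ih1 r2 h1.2 h2.2]
        constructor
        · rintro ⟨hv, ha, hb⟩
          refine ⟨?_, ?_⟩
          · intro p hp
            rcases List.mem_cons.mp hp with he | hr
            · rw [he, lkD_cons_eq, if_pos rfl]; exact hv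
            · rw [show p = (p.1, p.2) from rfl, lkD_cons_eq,
                if_neg (fun he => absurd (he ▸ (h1.1 p hr)) (lt_irrefl _))]
              exact ha p hr
          · intro p hp
            rcases List.mem_cons.mp hp with he | hr
            · rw [he, lkD_cons_eq, if_pos rfl]; exact hv
            · rw [show p = (p.1, p.2) from rfl, lkD_cons_eq,
                if_neg (fun he => absurd (he ▸ (h2.1 p hr)) (lt_irrefl _))]
              exact hb p hr
        · rintro ⟨ha, hb⟩
          have hv : v2 ≤ v1 := by
            have := ha (k1, v1) (List.mem_cons_self)
            rwa [lkD_cons_eq, if_pos rfl] at this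
          refine ⟨hv, ?_, ?_⟩
          · intro p hp
            have := ha p (List.mem_cons_of_mem _ hp)
            rwa [show p = (p.1, p.2) from rfl, lkD_cons_eq,
              if_neg (fun he => absurd (he ▸ (h1.1 p hp)) (lt_irrefl _))] at this
          · intro p hp
            have := hb p (List.mem_cons_of_mem _ hp)
            rwa [show p = (p.1, p.2) from rfl, lkD_cons_eq,
              if_neg (fun he => absurd (he ▸ (h2.1 p hp)) (lt_irrefl _))] at this
      · by_cases hlt : k1 < k2
        · have hbne : (k1 == k2) = false := by simp [heq]
          simp only [dcMerge, hbne, Bool.false_eq_true, if_false, hlt, if_true]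
          rw [show (if v1 < 0 then false else dcMerge r1 ((k2, v2) :: r2)) = true ↔
                (0 ≤ v1 ∧ dcMerge r1 ((k2, v2) :: r2) = true) by split_ifs with h <;> simp <;> omega,
            ih1 ((k2, v2) :: r2) h1.2 (List.pairwise_cons.mpr h2)]
          have hk1no : lkD ((k2, v2) :: r2) k1 = 0 := by
            apply lkD_of_not_mem
            simp only [List.map_cons, List.mem_cons, not_or]
            exact ⟨fun he => absurd (he ▸ hlt) (lt_irrefl _),
              fun hm => by
                obtain ⟨p, hp, hpe⟩ := List.mem_map.mp hm
                exact absurd (hpe ▸ lt_trans hlt (h2.1 p hp)) (lt_irrefl _)⟩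
          constructor
          · rintro ⟨hv, ha, hb⟩
            refine ⟨?_, ?_⟩
            · intro p hp
              rcases List.mem_cons.mp hp with he | hr
              · rw [he]; simpa [hk1no] using hv
              · exact ha p hr
            · intro p hp
              have := hb p hp
              rw [show p = (p.1, p.2) from rfl, lkD_cons_eq, if_neg ?_]
              · exact this
              · rcases List.mem_cons.mp hp with he | hr
                · rw [he]; exact fun h => heq h.symm
                · exact fun he => absurd (he ▸ lt_trans hlt (h2.1 p hr)) (lt_irrefl _)
          · rintro ⟨ha, hb⟩
            refine ⟨?_, ?_, ?_⟩
            · have := ha (k1, v1) (List.mem_cons_self)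
              rwa [hk1no] at this
            · exact fun p hp => ha p (List.mem_cons_of_mem _ hp)
            · intro p hp
              have := hb p hp
              rwa [show p = (p.1, p.2) from rfl, lkD_cons_eq, if_neg ?_] at this
              rcases List.mem_cons.mp hp with he | hr
              · rw [he]; exact fun h => heq h.symm
              · exact fun he => absurd (he ▸ lt_trans hlt (h2.1 p hr)) (lt_irrefl _)
        · have hgt : k2 < k1 := lt_of_le_of_ne (le_of_not_gt hlt) (fun h => heq h.symm)
          have hbne : (k1 == k2) = false := by simp [heq]
          simp only [dcMerge, hbne, Bool.false_eq_true, if_false, hlt, if_false]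
          rw [show (if v2 > 0 then false else dcMerge ((k1, v1) :: r1) r2) = true ↔
                (v2 ≤ 0 ∧ dcMerge ((k1, v1) :: r1) r2 = true) by split_ifs with h <;> simp <;> omega,
            ih2 h2.2]
          have hk2no : lkD ((k1, v1) :: r1) k2 = 0 := by
            apply lkD_of_not_mem
            simp only [List.map_cons, List.mem_cons, not_or]
            exact ⟨fun he => heq he.symm,
              fun hm => by
                obtain ⟨p, hp, hpe⟩ := List.mem_map.mp hm
                exact absurd (hpe ▸ lt_trans hgt (h1.1 p hp)) (lt_irrefl _)⟩
          constructor
          · rintro ⟨hv, ha, hb⟩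
            refine ⟨?_, ?_⟩
            · intro p hp
              have := ha p hp
              rw [show p = (p.1, p.2) from rfl, lkD_cons_eq, if_neg ?_]
              · exact this
              · rcases List.mem_cons.mp hp with he | hr
                · rw [he]; exact heq
                · exact fun he => absurd (he ▸ lt_trans hgt (h1.1 p hr)) (lt_irrefl _)
            · intro p hp
              rcases List.mem_cons.mp hp with he | hr
              · rw [he]; simpa [hk2no] using hv
              · exact hb p hr
          · rintro ⟨ha, hb⟩
            refine ⟨?_, ?_, ?_⟩
            · have := hb (k2, v2) (List.mem_cons_self)
              rwa [hk2no] at this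
            · intro p hp
              have := ha p hp
              rwa [show p = (p.1, p.2) from rfl, lkD_cons_eq, if_neg ?_] at this
              rcases List.mem_cons.mp hp with he | hr
              · rw [he]; exact heq
              · exact fun he => absurd (he ▸ lt_trans hgt (h1.1 p hr)) (lt_irrefl _)
            · exact fun p hp => hb p (List.mem_cons_of_mem _ hp)

-- ===== A-side characterisation (A = per-key comparison) =====

theorem phase1_eq (s1 : List (String × Int)) :
    (PySem.Dict.ofList s1).items.foldl (fun d p => d.insert p.1 p.2) PySem.Dict.empty
      = PySem.Dict.ofList s1 := by
  have h := PySem.Dict.items_foldl_insert_fresh (l := (PySem.Dict.ofList s1).items)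
    (k := Prod.fst) (v := Prod.snd) (d := (PySem.Dict.empty : PySem.Dict String Int))
    (by intro a _; exact PySem.Dict.contains_empty _)
    (by simpa [PySem.Dict.keys] using PySem.Dict.nodup_keys_ofList (ps := s1))
  apply PySem.Dict.ext
  simpa [PySem.Dict.items] using h

theorem loop2_eq_none_iff (d1 : PySem.Dict String Int) (l : List (String × Int))
    (scores : PySem.Dict String Int) :
    doesContainLoop2 d1 l scores = none ↔ ∃ p ∈ l, d1.contains p.1 = false ∧ 0 < p.2 := by
  induction l generalizing scores with
  | nil => simp [doesContainLoop2]
  | cons p rest ih =>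
    obtain ⟨k, v⟩ := p
    by_cases h1 : d1.contains k
    · simp [doesContainLoop2, h1, ih]
    · by_cases h2 : 0 < v
      · have h1' : d1.contains k = false := by simpa using h1
        simp only [doesContainLoop2, h1', Bool.false_eq_true, if_false, h2, if_true, true_iff]
        exact ⟨(k, v), by simp, h1', h2⟩
      · simp [doesContainLoop2, h1, h2, ih]

theorem loop2_some_keys (d1 : PySem.Dict String Int) (l : List (String × Int))
    (scores d' : PySem.Dict String Int) (h : doesContainLoop2 d1 l scores = some d') :
    (hsub : ∀ p ∈ l, d1.contains p.1 = true → scores.contains p.1 = true) →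
    d'.keys = scores.keys := by
  intro hsub
  induction l generalizing scores with
  | nil => simp_all [doesContainLoop2]
  | cons p rest ih =>
    obtain ⟨j, v⟩ := p
    by_cases h1 : d1.contains j
    · simp only [doesContainLoop2, h1, if_true] at h
      have hc : scores.contains j = true := hsub (j, v) (by simp) h1
      have := ih _ h (fun p hp hcp => by
        rw [PySem.Dict.contains_modify]
        cases hb : (p.1 == j) <;> simp [hsub p (by simp [hp]) hcp])
      rw [this, PySem.Dict.keys_modify, PySem.Dict.keys_insert_of_contains _ _ hc]
    · have h1' : d1.contains j = false := by simpa using h1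
      simp only [doesContainLoop2, h1', Bool.false_eq_true, if_false] at h
      split at h
      · exact absurd h (by simp)
      · exact ih _ h (fun p hp => hsub p (by simp [hp]))

theorem loop2_some_getD (d1 : PySem.Dict String Int) (l : List (String × Int))
    (scores d' : PySem.Dict String Int) (h : doesContainLoop2 d1 l scores = some d') (k : String) :
    d'.getD k 0 = scores.getD k 0
      - ((l.filter (fun p => p.1 == k && d1.contains p.1)).map Prod.snd).sum := by
  induction l generalizing scores with
  | nil => simp_all [doesContainLoop2]
  | cons p rest ih =>
    obtain ⟨j, v⟩ := p
    by_cases h1 : d1.contains j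
    · simp only [doesContainLoop2, h1, if_true] at h
      rw [ih _ h]
      by_cases hk : j == k
      · have hk' : j = k := by simpa using hk
        subst hk'
        simp [h1, PySem.Dict.getD_modify_self, sub_sub]
      · have hk' : ¬ k = j := fun he => absurd (by simp [he]) hk
        simp [hk, PySem.Dict.getD_modify, hk']
    · have h1' : d1.contains j = false := by simpa using h1
      simp only [doesContainLoop2, h1', Bool.false_eq_true, if_false] at h
      split at h
      · exact absurd h (by simp)
      · rw [ih _ h]
        simp [h1]

theorem filter_key_of_nodup (l : List String) (hl : l.Nodup) (k : String) (c : String → Bool) :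
    l.filter (fun j => j == k && c j) = if k ∈ l ∧ c k = true then [k] else [] := by
  induction l with
  | nil => simp
  | cons x xs ih =>
    rw [List.nodup_cons] at hl
    obtain ⟨hx, hxs⟩ := hl
    rw [List.filter_cons]
    by_cases he : x = k
    · subst he
      by_cases hc : c x = true
      · have hnil : List.filter (fun j => j == x && c j) xs = [] := by
          apply List.filter_eq_nil_iff.mpr
          intro j hj hconj
          simp only [Bool.and_eq_true, beq_iff_eq] at hconj
          exact hx (hconj.1 ▸ hj)
        simp [hc, hnil]
      · simp [hc, ih hxs]
    · simp [he, ih hxs, Ne.symm he]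

theorem filter_sum_eq (d2 : PySem.Dict String Int) (k : String) (c : String → Bool)
    (hnd : d2.keys.Nodup) :
    ((d2.items.filter (fun p => p.1 == k && c p.1)).map Prod.snd).sum
      = if c k && d2.contains k then d2.getD k 0 else 0 := by
  rw [PySem.Dict.items_eq_map_keys d2 hnd 0, List.filter_map,
    PySem.Dict.contains_eq_decide_mem_keys]
  have : (fun p => p.1 == k && c p.1) ∘ (fun j => (j, d2.getD j 0)) = fun j => j == k && c j := rfl
  rw [this, filter_key_of_nodup _ hnd k c]
  by_cases hm : k ∈ d2.keys <;> by_cases hc : c k = true <;>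
    simp [hm, hc]

-- A returns exactly 'every key of either dict: scores1 value covers scores2 value'
theorem does_contain_iff (s1 s2 : List (String × Int)) :
    does_contain s1 s2 = true ↔
      (∀ p ∈ (PySem.Dict.ofList s1).items, (PySem.Dict.ofList s2).getD p.1 0 ≤ p.2) ∧
      (∀ p ∈ (PySem.Dict.ofList s2).items, p.2 ≤ (PySem.Dict.ofList s1).getD p.1 0) := by
  unfold does_contain
  simp only [phase1_eq]
  have hnd1 := PySem.Dict.nodup_keys_ofList s1
  have hnd2 := PySem.Dict.nodup_keys_ofList s2
  by_cases hbad : ∃ p ∈ (PySem.Dict.ofList s2).items,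
      (PySem.Dict.ofList s1).contains p.1 = false ∧ 0 < p.2
  · rw [(loop2_eq_none_iff _ _ _).mpr hbad]
    obtain ⟨⟨k, v⟩, hp, hnc, hpos⟩ := hbad
    simp only [Bool.false_eq_true, false_iff, not_and]
    intro _
    push_neg
    refine ⟨(k, v), hp, ?_⟩
    rw [PySem.Dict.getD_of_not_contains _ _ hnc]
    simpa using hpos
  · rcases hopt : doesContainLoop2 (PySem.Dict.ofList s1) (PySem.Dict.ofList s2).items
        (PySem.Dict.ofList s1) with _ | d'
    · exact absurd ((loop2_eq_none_iff _ _ _).mp hopt) hbad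
    have hkeys : d'.keys = (PySem.Dict.ofList s1).keys :=
      loop2_some_keys _ _ _ _ hopt (fun p _ hc => hc)
    have hnd' : d'.keys.Nodup := hkeys ▸ hnd1
    push_neg at hbad
    have key : ∀ k, (PySem.Dict.ofList s1).contains k = true →
        d'.getD k 0 = (PySem.Dict.ofList s1).getD k 0 - (PySem.Dict.ofList s2).getD k 0 := by
      intro k hc1
      have hv := loop2_some_getD _ _ _ _ hopt k
      rw [filter_sum_eq _ _ _ hnd2, hc1, Bool.true_and] at hv
      by_cases hc2 : (PySem.Dict.ofList s2).contains k = true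
      · rwa [if_pos hc2] at hv
      · rw [if_neg hc2] at hv
        rw [PySem.Dict.getD_of_not_contains (PySem.Dict.ofList s2) 0 (by simpa using hc2)]
        omega
    show d'.items.all (fun p => !decide (p.2 < 0)) = true ↔ _
    rw [PySem.Dict.items_eq_map_keys d' hnd' 0, List.all_map, hkeys]
    rw [List.all_eq_true]
    constructor
    · intro hall
      constructor
      · intro p hp
        have hc1 : (PySem.Dict.ofList s1).contains p.1 = true := by
          rw [PySem.Dict.contains_iff_mem_keys]
          exact PySem.Dict.mem_keys_of_mem_items _ hp
        have hk1 : p.1 ∈ (PySem.Dict.ofList s1).keys :=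
          PySem.Dict.mem_keys_of_mem_items _ hp
        have := hall p.1 hk1
        simp only [Function.comp, Bool.not_eq_eq_eq_not, Bool.not_true, decide_eq_false_iff_not] at this
        rw [key p.1 hc1, PySem.Dict.getD_of_mem_items _ (show (p.1, p.2) ∈ _ from hp) hnd1 0] at this
        omega
      · intro p hp
        by_cases hc1 : (PySem.Dict.ofList s1).contains p.1 = true
        · have hk1 : p.1 ∈ (PySem.Dict.ofList s1).keys :=
            (PySem.Dict.contains_iff_mem_keys _ _).mp hc1
          have := hall p.1 hk1
          simp only [Function.comp, Bool.not_eq_eq_eq_not, Bool.not_true, decide_eq_false_iff_not] at this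
          rw [key p.1 hc1, PySem.Dict.getD_of_mem_items _ (show (p.1, p.2) ∈ _ from hp) hnd2 0] at this
          omega
        · have hc1' : (PySem.Dict.ofList s1).contains p.1 = false := by simpa using hc1
          have hle := hbad p hp hc1'
          rw [PySem.Dict.getD_of_not_contains _ _ hc1']
          omega
    · rintro ⟨ha, hb⟩ k hk
      have hc1 : (PySem.Dict.ofList s1).contains k = true :=
        (PySem.Dict.contains_iff_mem_keys _ _).mpr hk
      simp only [Function.comp, Bool.not_eq_eq_eq_not, Bool.not_true, decide_eq_false_iff_not]
      rw [key k hc1]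
      have hitem : (k, (PySem.Dict.ofList s1).getD k 0) ∈ (PySem.Dict.ofList s1).items := by
        rw [PySem.Dict.items_eq_map_keys _ hnd1 0]
        exact List.mem_map.mpr ⟨k, hk, rfl⟩
      have := ha _ hitem
      simp only at this
      omega

-- ===== B-side characterisation (same per-key comparison) =====

theorem sorted_keys_pairwise_lt (d : PySem.Dict String Int) (hnd : d.keys.Nodup) :
    (PySem.List.sorted d.items (fun kv => kv.1)).Pairwise (fun a b => a.1 < b.1) := by
  have hperm : (PySem.List.sorted d.items (fun kv => kv.1)).Perm d.items :=
    PySem.List.sorted_perm _ _ _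
  have hndk : ((PySem.List.sorted d.items (fun kv => kv.1)).map Prod.fst).Nodup :=
    (hperm.map Prod.fst).nodup_iff.mpr hnd
  have hle : (PySem.List.sorted d.items (fun kv => kv.1)).Pairwise (fun a b => a.1 ≤ b.1) :=
    PySem.List.sorted_pairwise _ _
  have hne : (PySem.List.sorted d.items (fun kv => kv.1)).Pairwise (fun a b => a.1 ≠ b.1) :=
    List.pairwise_map.mp hndk
  exact (hle.and hne).imp (fun h => lt_of_le_of_ne h.1 h.2)

theorem lkD_sorted (d : PySem.Dict String Int) (hnd : d.keys.Nodup) (k : String) :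
    lkD (PySem.List.sorted d.items (fun kv => kv.1)) k = d.getD k 0 := by
  have hperm : (PySem.List.sorted d.items (fun kv => kv.1)).Perm d.items :=
    PySem.List.sorted_perm _ _ _
  have hndk : ((PySem.List.sorted d.items (fun kv => kv.1)).map Prod.fst).Nodup :=
    (hperm.map Prod.fst).nodup_iff.mpr hnd
  by_cases hm : k ∈ d.keys
  · have hitem : (k, d.getD k 0) ∈ d.items := by
      rw [PySem.Dict.items_eq_map_keys _ hnd 0]
      exact List.mem_map.mpr ⟨k, hm, rfl⟩
    exact lkD_of_mem _ _ _ hndk (hperm.mem_iff.mpr hitem)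
  · rw [PySem.Dict.getD_of_not_contains _ _ (by
      rw [PySem.Dict.contains_eq_decide_mem_keys]; simpa using hm)]
    apply lkD_of_not_mem
    intro hmem
    apply hm
    have := (hperm.map Prod.fst).mem_iff.mp hmem
    simpa [PySem.Dict.keys] using this

theorem does_contain_eq_alt (s1 s2 : List (String × Int)) :
    does_contain s1 s2 = does_contain_alt s1 s2 := by
  have hnd1 := PySem.Dict.nodup_keys_ofList s1
  have hnd2 := PySem.Dict.nodup_keys_ofList s2
  have hperm1 : (PySem.List.sorted (PySem.Dict.ofList s1).items (fun kv => kv.1)).Perm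
      (PySem.Dict.ofList s1).items := PySem.List.sorted_perm _ _ _
  have hperm2 : (PySem.List.sorted (PySem.Dict.ofList s2).items (fun kv => kv.1)).Perm
      (PySem.Dict.ofList s2).items := PySem.List.sorted_perm _ _ _
  rw [Bool.eq_iff_iff, does_contain_iff]
  show _ ↔ dcMerge _ _ = true
  rw [dcMerge_iff _ _ (sorted_keys_pairwise_lt _ hnd1) (sorted_keys_pairwise_lt _ hnd2)]
  constructor
  · rintro ⟨ha, hb⟩
    constructor
    · intro p hp
      rw [lkD_sorted _ hnd2]
      exact ha p (hperm1.mem_iff.mp hp)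
    · intro p hp
      rw [lkD_sorted _ hnd1]
      exact hb p (hperm2.mem_iff.mp hp)
  · rintro ⟨ha, hb⟩
    constructor
    · intro p hp
      have := ha p (hperm1.mem_iff.mpr hp)
      rwa [lkD_sorted _ hnd2] at this
    · intro p hp
      have := hb p (hperm2.mem_iff.mpr hp)
      rwa [lkD_sorted _ hnd1] at this

-- ===== VERDICT (by name: the statement is the Claim_ definition above) =====
theorem does_contain_spec : Claim_equal_does_contain := by
  intro s1 s2 _
  show does_contain s1 s2 = does_contain_alt s1 s2
  exact does_contain_eq_alt s1 s2
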